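-- pv_equiv track=rewrite | github.com/GWillS163/pyCombiner | PyCombiner2/inline_imports.py | remove_main_guard
-- ===== SOURCE A (Python) =====
-- def remove_main_guard(code):
--     """
--     将代码中 if __name__ == '__main__': 块及其缩进部分全部注释掉。
--     简单实现：对每行代码，如果匹配到 if __name__ == '__main__': 则在前面添加 '#'，
--     后续缩进的行也加 '#'，直到遇到非空且缩进相同或更少的行。
--     此处采用简单逐行处理的策略，适合大部分情况。
--     """
--     lines = code.splitlines()
--     new_lines = []
--     in_main = False
--     main_indent = None
--     for line in lines:
--         stripped = line.lstrip()
--         indent = len(line) - len(stripped)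
--         if not in_main and stripped.startswith("if __name__") and "__main__" in stripped:
--             in_main = True
--             main_indent = indent
--             new_lines.append("# " + line)
--             continue
--         if in_main:
--             # 如果本行缩进大于 main_indent，认为属于 if 块
--             if line.strip() == "":
--                 new_lines.append(line)
--             elif indent > main_indent:
--                 new_lines.append("# " + line)
--             else:
--                 in_main = False
--                 new_lines.append(line)
--         else:
--             new_lines.append(line)
--     return "\n".join(new_lines) + "\n"
-- ===== SOURCE B (Python) =====
-- def remove_main_guard(code):
--     # Staged search-and-slice algorithm: instead of a per-line state machine,
--     # repeatedly SEARCH the remaining lines for the next guard line, copy the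
--     # prefix untouched, then SEARCH for the block's terminator (first non-blank
--     # line not indented deeper), comment the whole slice in between in one go,
--     # emit the terminator verbatim and continue after it.
--     def is_guard(line):
--         s = line.lstrip()
--         return s.startswith("if __name__") and "__main__" in s
--
--     def indent(line):
--         return len(line) - len(line.lstrip())
--
--     def mark(line):
--         return line if line.strip() == "" else "# " + line
--
--     out = []
--     rest = code.splitlines()
--     while True:
--         k = next((i for i, l in enumerate(rest) if is_guard(l)), None)
--         if k is None:
--             out.extend(rest)
--             break
--         m = indent(rest[k])
--         out.extend(rest[:k])
--         out.append("# " + rest[k])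
--         tail = rest[k + 1:]
--         e = next((i for i, l in enumerate(tail)
--                   if l.strip() != "" and indent(l) <= m), None)
--         if e is None:
--             out.extend(mark(l) for l in tail)
--             break
--         out.extend(mark(l) for l in tail[:e])
--         out.append(tail[e])
--         rest = tail[e + 1:]
--     return "\n".join(out) + "\n"
-- ===== Notes on version B (the rewrite author's own statement) =====
-- stated objective: alternative
-- what changed: Replaces A's per-line state machine (in_main flag + main_indent carried across the loop) with a staged search-and-slice algorithm: repeatedly find the index of the next guard line, copy the prefix slice untouched, find the index of the block terminator, comment the slice between them in one batch, and continue after the terminator; no per-line state survives between stages.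
import Mathlib
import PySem

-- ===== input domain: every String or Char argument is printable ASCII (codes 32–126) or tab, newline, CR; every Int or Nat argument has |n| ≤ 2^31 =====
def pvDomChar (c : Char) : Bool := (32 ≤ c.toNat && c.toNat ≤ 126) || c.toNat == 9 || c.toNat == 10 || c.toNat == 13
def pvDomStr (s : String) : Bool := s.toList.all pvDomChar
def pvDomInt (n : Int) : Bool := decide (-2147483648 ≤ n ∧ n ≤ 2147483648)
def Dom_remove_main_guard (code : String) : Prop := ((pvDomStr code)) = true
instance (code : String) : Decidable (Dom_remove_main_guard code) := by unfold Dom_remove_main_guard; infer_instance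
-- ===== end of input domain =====

-- B replaces A's per-line state machine by a staged search-and-slice algorithm
-- (find next guard, comment the block slice in one batch); alternative decomposition, same cost.

-- ===== PORT A =====
-- A's loop body; state = (in_main, main_indent, new_lines). In Python main_indent
-- is always an int whenever in_main is True; the '.getD 0' default is only read on
-- that unreachable path (Python would raise comparing int to None there).
def pvStepA (st : Bool × Option Int × List String) (line : String) :
    Bool × Option Int × List String :=
  let stripped := PySem.Str.lstrip line
  let indent : Int := (PySem.Str.len line : Int) - (PySem.Str.len stripped : Int)
  match st with
  | (inMain, mi, acc) =>
    if !inMain && PySem.Str.startswith stripped "if __name__"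
        && PySem.Str.isIn "__main__" stripped then
      (true, some indent, acc ++ ["# " ++ line])
    else if inMain then
      if PySem.Str.strip line == "" then (inMain, mi, acc ++ [line])
      else if indent > mi.getD 0 then (inMain, mi, acc ++ ["# " ++ line])
      else (false, mi, acc ++ [line])
    else (inMain, mi, acc ++ [line])

def remove_main_guard (code : String) : String :=
  let lines := PySem.Str.splitlines code
  PySem.Str.join "\n" (lines.foldl pvStepA (false, none, [])).2.2 ++ "\n"

-- ===== PORT B =====
-- helpers of Source B: is_guard, indent, mark
def pvIsGuard (line : String) : Bool :=
  let s := PySem.Str.lstrip line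
  PySem.Str.startswith s "if __name__" && PySem.Str.isIn "__main__" s

def pvIndent (line : String) : Int :=
  (PySem.Str.len line : Int) - (PySem.Str.len (PySem.Str.lstrip line) : Int)

def pvMark (line : String) : String :=
  if PySem.Str.strip line == "" then line else "# " ++ line

def pvEnds (m : Int) (l : String) : Bool :=
  PySem.Str.strip l != "" && decide (pvIndent l ≤ m)

-- the while-loop of Source B: out = accumulator, rest = remaining lines;
-- the two 'next((i for i,l in enumerate(..) if ..), None)' searches are List.findIdx?
def pvBLoop (out rest : List String) : List String :=
  match _hk : rest.findIdx? pvIsGuard with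
  | none => out ++ rest
  | some k =>
    let g := (rest.drop k).headD ""          -- rest[k] (always in range: k < rest.length)
    let m := pvIndent g
    let out1 := out ++ rest.take k ++ ["# " ++ g]
    let tail := rest.drop (k + 1)
    match tail.findIdx? (pvEnds m) with
    | none => out1 ++ tail.map pvMark
    | some e =>
      pvBLoop (out1 ++ (tail.take e).map pvMark ++ [(tail.drop e).headD ""]) (tail.drop (e + 1))
termination_by rest.length
decreasing_by
  have hk' : k < rest.length := (List.findIdx?_eq_some_iff_findIdx_eq.mp _hk).1
  simp only [List.length_drop]
  omega

def remove_main_guard_alt (code : String) : String :=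
  PySem.Str.join "\n" (pvBLoop [] (PySem.Str.splitlines code)) ++ "\n"

-- ===== PRECONDITION & SPEC =====
def Spec_remove_main_guard (code : String) (out : String) : Prop := out = remove_main_guard_alt code
instance (code : String) (out : String) : Decidable (Spec_remove_main_guard code out) := by unfold Spec_remove_main_guard; infer_instance

-- ===== CLAIM (what is proved, stated in full; the proofs are below) =====
def Claim_equal_remove_main_guard : Prop := ∀ (code : String), Dom_remove_main_guard code → Spec_remove_main_guard code (remove_main_guard code)

-- ===== LEMMAS AND PROOFS =====

-- Proof-side reference recursion: outer = outside any guard block, inner = inside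
-- a block started with indent m.  Both A's fold and B's search loop are proved
-- equal to it.
mutual
def pvOuter : List String → List String
  | [] => []
  | line :: rest =>
    if pvIsGuard line then
      ("# " ++ line) :: pvInner (pvIndent line) rest
    else
      line :: pvOuter rest
termination_by l => l.length

def pvInner (m : Int) : List String → List String
  | [] => []
  | ln :: rest =>
    if PySem.Str.strip ln == "" then
      ln :: pvInner m rest
    else if pvIndent ln > m then
      ("# " ++ ln) :: pvInner m rest
    else
      ln :: pvOuter rest
termination_by l => l.length
end

-- A's fold from a not-in-main state produces pvOuter's lines; from an in-main state
-- with recorded indent m it produces pvInner m's lines (simultaneously, by length).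
theorem pvFold_eq : ∀ (n : Nat) (lines : List String), lines.length ≤ n →
    (∀ (mi : Option Int) (acc : List String),
      (lines.foldl pvStepA (false, mi, acc)).2.2 = acc ++ pvOuter lines) ∧
    (∀ (m : Int) (acc : List String),
      (lines.foldl pvStepA (true, some m, acc)).2.2 = acc ++ pvInner m lines) := by
  intro n
  induction n with
  | zero =>
    intro lines h
    have : lines = [] := List.eq_nil_of_length_eq_zero (Nat.le_zero.mp h)
    subst this
    simp [pvOuter, pvInner]
  | succ n ih =>
    intro lines h
    cases lines with
    | nil => simp [pvOuter, pvInner]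
    | cons line rest =>
      have hr : rest.length ≤ n := by simpa using Nat.lt_succ_iff.mp (Nat.lt_of_lt_of_le (by simp) h)
      constructor
      · intro mi acc
        rw [List.foldl_cons]
        by_cases hg : pvIsGuard line = true
        · have hg' := hg; simp [pvIsGuard] at hg'
          rw [show pvStepA (false, mi, acc) line
              = (true, some (pvIndent line), acc ++ ["# " ++ line]) by
                simp [pvStepA, pvIndent, hg']]
          rw [(ih rest hr).2, pvOuter]
          simp [hg]
        · have hg' := hg; simp [pvIsGuard] at hg'
          rw [show pvStepA (false, mi, acc) line = (false, mi, acc ++ [line]) by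
              simp only [pvStepA]
              split
              · rename_i c
                exfalso; simp at c; exact absurd c.2 (by simp [hg' c.1])
              · simp]
          rw [(ih rest hr).1, pvOuter]
          simp [hg]
      · intro m acc
        rw [List.foldl_cons]
        by_cases hb : (PySem.Str.strip line == "") = true
        · simp at hb
          rw [show pvStepA (true, some m, acc) line = (true, some m, acc ++ [line]) by
              simp [pvStepA, hb]]
          rw [(ih rest hr).2, pvInner]
          simp [hb]
        · simp at hb
          by_cases hi : pvIndent line > m
          · have hi' : m + ((PySem.Chars.lstrip line.toList).length : Int) < (line.length : Int) := by
              simp [pvIndent] at hi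
              omega
            rw [show pvStepA (true, some m, acc) line = (true, some m, acc ++ ["# " ++ line]) by
                simp [pvStepA, hb, hi']]
            rw [(ih rest hr).2, pvInner]
            simp [hb, pvIndent]
            omega
          · have hi' : (line.length : Int) ≤ m + ((PySem.Chars.lstrip line.toList).length : Int) := by
              simp [pvIndent] at hi; omega
            rw [show pvStepA (true, some m, acc) line = (false, some m, acc ++ [line]) by
                simp [pvStepA, hb]; omega]
            rw [(ih rest hr).1, pvInner]
            simp [hb, pvIndent]
            omega

-- findIdx? characterizations of pvOuter / pvInner
theorem pvOuter_none : ∀ (rest : List String), (∀ x ∈ rest, pvIsGuard x = false) →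
    pvOuter rest = rest := by
  intro rest
  induction rest with
  | nil => intro _; simp [pvOuter]
  | cons a l ih =>
    intro h
    rw [pvOuter]
    simp [h a (by simp), ih (fun x hx => h x (by simp [hx]))]

theorem pvOuter_some : ∀ (rest : List String) (k : Nat), rest.findIdx? pvIsGuard = some k →
    pvOuter rest = rest.take k ++ ["# " ++ (rest.drop k).headD ""]
      ++ pvInner (pvIndent ((rest.drop k).headD "")) (rest.drop (k + 1)) := by
  intro rest
  induction rest with
  | nil => intro k h; simp at h
  | cons a l ih =>
    intro k h
    rw [List.findIdx?_cons] at h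
    by_cases hg : pvIsGuard a = true
    · simp [hg] at h
      subst h
      rw [pvOuter]
      simp [hg]
    · simp [hg] at h
      obtain ⟨k', hk', rfl⟩ := h
      rw [pvOuter]
      rw [if_neg (by simp [hg])]
      rw [ih k' hk']
      simp

theorem pvInner_none : ∀ (tail : List String) (m : Int), (∀ x ∈ tail, pvEnds m x = false) →
    pvInner m tail = tail.map pvMark := by
  intro tail
  induction tail with
  | nil => intro m _; simp [pvInner]
  | cons a l ih =>
    intro m h
    have he' : ¬ (PySem.Str.strip a ≠ "" ∧ pvIndent a ≤ m) := by
      simpa [pvEnds] using h a (by simp)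
    have ihl := ih m (fun x hx => h x (by simp [hx]))
    rw [pvInner]
    by_cases hb : (PySem.Str.strip a == "") = true
    · simp at hb
      simp [hb, pvMark, ihl]
    · simp at hb
      have hi : pvIndent a > m := by
        by_contra hn
        exact he' ⟨hb, by omega⟩
      simp [hb, hi, pvMark, ihl]

theorem pvInner_some : ∀ (tail : List String) (m : Int) (e : Nat),
    tail.findIdx? (pvEnds m) = some e →
    pvInner m tail = (tail.take e).map pvMark ++ [(tail.drop e).headD ""]
      ++ pvOuter (tail.drop (e + 1)) := by
  intro tail
  induction tail with
  | nil => intro m e h; simp at h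
  | cons a l ih =>
    intro m e h
    rw [List.findIdx?_cons] at h
    by_cases he : pvEnds m a = true
    · simp [he] at h
      subst h
      have he' : PySem.Str.strip a ≠ "" ∧ pvIndent a ≤ m := by
        simpa [pvEnds] using he
      have h2 : ¬ pvIndent a > m := by omega
      rw [pvInner]
      simp [he'.1, h2]
    · simp [he] at h
      obtain ⟨e', he', rfl⟩ := h
      have hne : ¬ (PySem.Str.strip a ≠ "" ∧ pvIndent a ≤ m) := by
        simpa [pvEnds] using he
      rw [pvInner]
      by_cases hb : (PySem.Str.strip a == "") = true
      · simp at hb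
        simp [hb, pvMark, ih m e' he']
      · simp at hb
        have hi : pvIndent a > m := by
          by_contra hn
          exact hne ⟨hb, by omega⟩
        simp [hb, hi, pvMark, ih m e' he']

-- B's loop accumulates exactly pvOuter
theorem pvBLoop_eq : ∀ (n : Nat) (rest : List String), rest.length ≤ n →
    ∀ (out : List String), pvBLoop out rest = out ++ pvOuter rest := by
  intro n
  induction n with
  | zero =>
    intro rest h out
    have : rest = [] := List.eq_nil_of_length_eq_zero (Nat.le_zero.mp h)
    subst this
    rw [pvBLoop]
    simp [pvOuter]
  | succ n ih =>
    intro rest h out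
    rw [pvBLoop]
    cases hk : rest.findIdx? pvIsGuard with
    | none =>
      simp [pvOuter_none rest (List.findIdx?_eq_none_iff.mp hk)]
    | some k =>
      have hk' : k < rest.length := (List.findIdx?_eq_some_iff_findIdx_eq.mp hk).1
      simp only
      cases he : (rest.drop (k + 1)).findIdx? (pvEnds (pvIndent ((rest.drop k).headD ""))) with
      | none =>
        rw [pvOuter_some rest k hk,
            pvInner_none (rest.drop (k + 1)) (pvIndent ((rest.drop k).headD ""))
              (List.findIdx?_eq_none_iff.mp he)]
        simp
      | some e =>
        have hlen : ((rest.drop (k + 1)).drop (e + 1)).length ≤ n := by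
          simp only [List.length_drop]
          omega
        show pvBLoop
            (out ++ rest.take k ++ ["# " ++ (rest.drop k).headD ""]
              ++ ((rest.drop (k + 1)).take e).map pvMark
              ++ [((rest.drop (k + 1)).drop e).headD ""])
            ((rest.drop (k + 1)).drop (e + 1)) = out ++ pvOuter rest
        rw [ih _ hlen,
            pvOuter_some rest k hk,
            pvInner_some (rest.drop (k + 1)) (pvIndent ((rest.drop k).headD "")) e he]
        simp

-- ===== VERDICT (by name: the statement is the Claim_ definition above) =====
theorem remove_main_guard_spec : Claim_equal_remove_main_guard := by
  intro code _
  unfold Spec_remove_main_guard remove_main_guard remove_main_guard_alt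
  show PySem.Str.join "\n" ((PySem.Str.splitlines code).foldl pvStepA (false, none, [])).2.2 ++ "\n"
      = PySem.Str.join "\n" (pvBLoop [] (PySem.Str.splitlines code)) ++ "\n"
  rw [pvBLoop_eq (PySem.Str.splitlines code).length (PySem.Str.splitlines code) le_rfl []]
  rw [(pvFold_eq (PySem.Str.splitlines code).length (PySem.Str.splitlines code) le_rfl).1 none []]
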